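-- pv_equiv track=rewrite | github.com/hzwuhao8/ccc | 2004j05.py | level_extend
-- ===== SOURCE A (Python) =====
-- def myprint(x):
--     pass
--
-- def extend( seg  ):
--     (p1,p2) = seg
--     (x1,y1) = p1
--     (x2,y2) = p2
--     base = 3
--     res = []
--     if x1 == x2:
--         b = y2  - y1
--         delta = b // base
--         res.append(((x1,y1) ,(x1, y1 + delta)) )
--         res.append(((x1, y1+delta), (x1-delta, y1+delta)))
--         res.append(((x1-delta, y1+delta), (x1-delta, y1 + 2*delta)))
--         res.append(((x1-delta, y1+2*delta), (x1, y1+ 2*delta)))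
--         res.append(((x1, y1+ 2*delta), (x2, y2)))
--
--     elif y1 == y2:
--         a = x2 - x1
--         delta = a // base
--         res.append(((x1, y1), (x1+delta , y1 )))
--         res.append(((x1 + delta , y1  ), (x1 +  delta, y1 + delta)))
--         res.append(((x1 + delta, y1 + delta), (x1 +2* delta, y1 +  delta)))
--         res.append(((x1 +2 * delta, y1 +   delta), (x1 +2*delta , y1 )))
--         res.append(((x1 +2*delta , y1 ), (x2, y2)))
--
--
--     else:
--         myprint(f"ERROR (x1,y1),(x2,y2)={(x1,y1),(x2,y2)}")
--
--     return res
--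
-- def level_extend( seg0 , level ):
--
--     data=[seg0]
--     res=[seg0]
--     for i in range(level):
--         res = []
--         for seg in data:
--             #myprint(f"seg={seg}")
--             r1 = extend( seg )
--             myprint(f"r={i} r1={r1}")
--             res = res + r1
--         data = res
--     return res
-- ===== SOURCE B (Python) =====
-- def myprint(x):
--     pass
--
-- def subdivide(seg):
--     (x1, y1), (x2, y2) = seg
--     if x1 == x2:
--         d = (y2 - y1) // 3
--         pts = [(x1, y1), (x1, y1 + d), (x1 - d, y1 + d),
--                (x1 - d, y1 + 2 * d), (x1, y1 + 2 * d), (x2, y2)]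
--     elif y1 == y2:
--         d = (x2 - x1) // 3
--         pts = [(x1, y1), (x1 + d, y1), (x1 + d, y1 + d),
--                (x1 + 2 * d, y1 + d), (x1 + 2 * d, y1), (x2, y2)]
--     else:
--         return []
--     return list(zip(pts, pts[1:]))
--
-- def level_extend(seg0, level):
--     out = []
--     stack = [(seg0, level)]
--     while stack:
--         seg, lvl = stack.pop()
--         if lvl <= 0:
--             out.append(seg)
--         else:
--             for s in reversed(subdivide(seg)):
--                 stack.append((s, lvl - 1))
--     return out
-- ===== Notes on version B (the rewrite author's own statement) =====
-- stated objective: alternative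
-- what changed: Replaces A's iterative level-by-level breadth-first rebuild (and its 5-pair extend) with an explicit-stack depth-first traversal over (segment, remaining-level) pairs, whose subdivision builds the 6 corner points and zips consecutive ones into segments.
import Mathlib
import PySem

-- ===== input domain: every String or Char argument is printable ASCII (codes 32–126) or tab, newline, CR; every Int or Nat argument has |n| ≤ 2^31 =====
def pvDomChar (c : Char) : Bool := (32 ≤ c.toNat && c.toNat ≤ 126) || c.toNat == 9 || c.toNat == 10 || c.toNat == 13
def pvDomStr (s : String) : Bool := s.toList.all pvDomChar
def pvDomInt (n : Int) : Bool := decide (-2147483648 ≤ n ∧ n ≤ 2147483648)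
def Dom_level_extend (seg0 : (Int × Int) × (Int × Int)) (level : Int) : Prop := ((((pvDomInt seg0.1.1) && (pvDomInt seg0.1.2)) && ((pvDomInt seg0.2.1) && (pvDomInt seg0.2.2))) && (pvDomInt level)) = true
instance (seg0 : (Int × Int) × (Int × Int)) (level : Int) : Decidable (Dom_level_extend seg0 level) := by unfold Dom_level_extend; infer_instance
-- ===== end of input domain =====

-- B replaces A's level-by-level BFS rebuild with an explicit-stack depth-first traversal
-- and a point-list/zip subdivision; same output order, no speed claim.
-- ===== PORT A =====
-- 'extend' of Source A (myprint is a no-op, so the else branch just returns [])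
def extendA (seg : (Int × Int) × (Int × Int)) : List ((Int × Int) × (Int × Int)) :=
  let x1 := seg.1.1; let y1 := seg.1.2
  let x2 := seg.2.1; let y2 := seg.2.2
  let base : Int := 3
  if x1 == x2 then
    let b := y2 - y1
    let delta := PySem.Int.floordiv b base
    [((x1, y1), (x1, y1 + delta)),
     ((x1, y1 + delta), (x1 - delta, y1 + delta)),
     ((x1 - delta, y1 + delta), (x1 - delta, y1 + 2 * delta)),
     ((x1 - delta, y1 + 2 * delta), (x1, y1 + 2 * delta)),
     ((x1, y1 + 2 * delta), (x2, y2))]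
  else if y1 == y2 then
    let a := x2 - x1
    let delta := PySem.Int.floordiv a base
    [((x1, y1), (x1 + delta, y1)),
     ((x1 + delta, y1), (x1 + delta, y1 + delta)),
     ((x1 + delta, y1 + delta), (x1 + 2 * delta, y1 + delta)),
     ((x1 + 2 * delta, y1 + delta), (x1 + 2 * delta, y1)),
     ((x1 + 2 * delta, y1), (x2, y2))]
  else
    []

def level_extend (seg0 : (Int × Int) × (Int × Int)) (level : Int) : List ((Int × Int) × (Int × Int)) :=
  -- data=[seg0]; res=[seg0]; for i in range(level): res=[]; for seg in data: res = res + extend(seg); data = res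
  let st := (PySem.List.pyRange 0 level 1).foldl
    (fun (st : List ((Int × Int) × (Int × Int)) × List ((Int × Int) × (Int × Int))) _ =>
      let data := st.1
      let res := data.foldl (fun acc seg => acc ++ extendA seg) []
      (res, res))
    ([seg0], [seg0])
  st.2

-- ===== PORT B =====
-- subdivide of Source B: the 6 corner points, zipped with pts[1:] into consecutive segments
def subdivideB (seg : (Int × Int) × (Int × Int)) : List ((Int × Int) × (Int × Int)) :=
  let x1 := seg.1.1; let y1 := seg.1.2
  let x2 := seg.2.1; let y2 := seg.2.2
  if x1 == x2 then
    let d := PySem.Int.floordiv (y2 - y1) 3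
    let pts := [(x1, y1), (x1, y1 + d), (x1 - d, y1 + d),
                (x1 - d, y1 + 2 * d), (x1, y1 + 2 * d), (x2, y2)]
    List.zip pts (pts.drop 1)
  else if y1 == y2 then
    let d := PySem.Int.floordiv (x2 - x1) 3
    let pts := [(x1, y1), (x1 + d, y1), (x1 + d, y1 + d),
                (x1 + 2 * d, y1 + d), (x1 + 2 * d, y1), (x2, y2)]
    List.zip pts (pts.drop 1)
  else
    []

-- the while-stack loop of Source B: head of the list = top of Python's stack (list end);
-- 'for s in reversed(subdivide(seg)): stack.append(...)' is the foldl over the reversed children.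
-- Remaining levels are kept as a Nat ('lvl <= 0' of Source B is the 0 case; see level_extend_alt).
def loopB : List (((Int × Int) × (Int × Int)) × Nat) → List ((Int × Int) × (Int × Int)) → List ((Int × Int) × (Int × Int))
  | [], out => out
  | (seg, 0) :: rest, out => loopB rest (out ++ [seg])
  | (seg, n + 1) :: rest, out =>
      loopB ((subdivideB seg).reverse.foldl (fun st s => (s, n) :: st) rest) out
termination_by stack _ => (stack.map (fun p => 6 ^ p.2)).sum
decreasing_by
  · simp
  · have hlen : (subdivideB seg).length ≤ 5 := by
      rcases seg with ⟨⟨a, b⟩, ⟨c, d⟩⟩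
      simp only [subdivideB]
      split_ifs <;> simp
    have h1 : ∀ (l : List ((Int × Int) × (Int × Int))) (st : List (((Int × Int) × (Int × Int)) × Nat)),
        ((l.foldl (fun st s => (s, n) :: st) st).map (fun p => 6 ^ p.2)).sum
          = l.length * 6 ^ n + ((st.map (fun p => 6 ^ p.2)).sum) := by
      intro l; induction l with
      | nil => intro st; simp
      | cons a l ih =>
          intro st
          rw [List.foldl_cons, ih]
          simp only [List.map_cons, List.sum_cons, List.length_cons]
          ring
    rw [h1]
    have hmul : (subdivideB seg).reverse.length * 6 ^ n ≤ 5 * 6 ^ n := by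
      have h2 : (subdivideB seg).reverse.length ≤ 5 := by simpa using hlen
      exact Nat.mul_le_mul_right _ h2
    have h6 : 5 * 6 ^ n < 6 ^ (n + 1) := by
      have h8 : 0 < 6 ^ n := Nat.pow_pos (by norm_num)
      omega
    simp only [List.map_cons, List.sum_cons]
    exact Nat.add_lt_add_right (Nat.lt_of_le_of_lt hmul h6) _

def level_extend_alt (seg0 : (Int × Int) × (Int × Int)) (level : Int) : List ((Int × Int) × (Int × Int)) :=
  -- out=[]; stack=[(seg0, level)]; while stack: ...   ('lvl <= 0' ≡ toNat-image is 0)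
  loopB [(seg0, level.toNat)] []

-- ===== PRECONDITION & SPEC =====
def Spec_level_extend (seg0 : (Int × Int) × (Int × Int)) (level : Int) (out : List ((Int × Int) × (Int × Int))) : Prop := out = level_extend_alt seg0 level
instance (seg0 : (Int × Int) × (Int × Int)) (level : Int) (out : List ((Int × Int) × (Int × Int))) : Decidable (Spec_level_extend seg0 level out) := by unfold Spec_level_extend; infer_instance

-- ===== CLAIM (what is proved, stated in full; the proofs are below) =====
def Claim_equal_level_extend : Prop := ∀ (seg0 : (Int × Int) × (Int × Int)) (level : Int), Dom_level_extend seg0 level → Spec_level_extend seg0 level (level_extend seg0 level)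

-- ===== LEMMAS AND PROOFS =====
-- the depth-first result of one (segment, level) node, the common mathematical shape
def dfs (seg : (Int × Int) × (Int × Int)) : Nat → List ((Int × Int) × (Int × Int))
  | 0 => [seg]
  | n + 1 => (subdivideB seg).flatMap (fun s => dfs s n)

theorem extendA_eq_subdivideB (seg : (Int × Int) × (Int × Int)) :
    extendA seg = subdivideB seg := by
  rcases seg with ⟨⟨a, b⟩, ⟨c, d⟩⟩
  simp only [extendA, subdivideB]
  split_ifs <;> rfl

-- A side: one BFS step over a whole list of segments
def stepA (data : List ((Int × Int) × (Int × Int))) : List ((Int × Int) × (Int × Int)) :=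
  data.foldl (fun acc seg => acc ++ extendA seg) []

theorem stepA_eq_flatMap (data : List ((Int × Int) × (Int × Int))) :
    stepA data = data.flatMap subdivideB := by
  rw [stepA, PySem.List.foldl_append_eq_flatMap,
    show extendA = subdivideB from funext extendA_eq_subdivideB]
  simp

theorem iterate_stepA (n : Nat) :
    ∀ data : List ((Int × Int) × (Int × Int)),
      stepA^[n] data = data.flatMap (fun s => dfs s n) := by
  induction n with
  | zero => intro data; simp [dfs]
  | succ n ih =>
      intro data
      rw [Function.iterate_succ_apply, ih, stepA_eq_flatMap, List.flatMap_assoc]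
      simp [dfs]

theorem foldl_pair (l : List Int) :
    ∀ x : List ((Int × Int) × (Int × Int)),
      (l.foldl
        (fun (st : List ((Int × Int) × (Int × Int)) × List ((Int × Int) × (Int × Int))) _ =>
          let data := st.1
          let res := data.foldl (fun acc seg => acc ++ extendA seg) []
          (res, res))
        (x, x)).2 = stepA^[l.length] x := by
  induction l with
  | nil => intro x; simp
  | cons a l ih =>
      intro x
      simp only [List.foldl_cons, List.length_cons]
      rw [ih, Function.iterate_succ_apply]
      rfl

-- B side: the stack loop computes out ++ concatenated dfs of the stack entries
theorem loopB_eq (stack : List (((Int × Int) × (Int × Int)) × Nat))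
    (out : List ((Int × Int) × (Int × Int))) :
    loopB stack out = out ++ stack.flatMap (fun p => dfs p.1 p.2) := by
  induction stack, out using loopB.induct with
  | case1 out => simp [loopB]
  | case2 seg rest out ih => simp [loopB, ih, dfs]
  | case3 seg n rest out ih =>
      rw [loopB, ih]
      have hpush : ∀ (l : List ((Int × Int) × (Int × Int)))
          (st : List (((Int × Int) × (Int × Int)) × Nat)),
          l.reverse.foldl (fun st s => (s, n) :: st) st = l.map (fun s => (s, n)) ++ st := by
        intro l
        induction l using List.reverseRecOn with
        | nil => intro st; simp
        | append_singleton l a ih2 => intro st; simp [ih2]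
      rw [hpush]
      simp [dfs, List.flatMap_append, List.flatMap_map]

theorem level_extend_spec : Claim_equal_level_extend := by
  intro seg0 level _
  unfold Spec_level_extend level_extend level_extend_alt
  rw [foldl_pair, PySem.List.length_pyRange_one, iterate_stepA, loopB_eq]
  simp
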